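-- pv_equiv track=rewrite | github.com/MauriceCalvert/andante | motifs/episode_dialogue.py | _compute_step_schedule
-- ===== SOURCE A (Python) =====
-- def _compute_step_schedule(start_deg: int, end_deg: int, bar_count: int) -> list[int]:
--     """Cumulative degree offsets for each bar (index 0..bar_count-1).
--
--     schedule[i] is the cumulative degree offset for bar i relative to start_deg.
--     Front-loaded: first r bars get (q+1) steps; remaining bars get q steps.
--     This gives larger steps early and commits the voice to its direction.
--     """
--     total_steps: int = end_deg - start_deg
--     sign: int = 1 if total_steps >= 0 else -1
--     q, r = divmod(abs(total_steps), bar_count)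
--     schedule: list[int] = []
--     cumulative: int = 0
--     for i in range(bar_count):
--         step: int = (q + 1) if i < r else q
--         cumulative += step * sign
--         schedule.append(cumulative)
--     return schedule
-- ===== SOURCE B (Python) =====
-- def _compute_step_schedule(start_deg: int, end_deg: int, bar_count: int) -> list[int]:
--     q, r = divmod(abs(end_deg - start_deg), bar_count)
--     s = 1 if end_deg >= start_deg else -1
--     big = [s * k * (q + 1) for k in range(1, r + 1)]
--     small = [s * (r * (q + 1) + j * q) for j in range(1, bar_count - r + 1)]
--     return big + small
-- ===== Notes on version B (the rewrite author's own statement) =====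
-- stated objective: alternative
-- what changed: Replaces the running-total loop (accumulator + append) by concatenating two independent list comprehensions: the first r front-loaded bars via k*(q+1) and the remaining bars via r*(q+1)+j*q, each element a direct formula with no loop state.
import Mathlib
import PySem

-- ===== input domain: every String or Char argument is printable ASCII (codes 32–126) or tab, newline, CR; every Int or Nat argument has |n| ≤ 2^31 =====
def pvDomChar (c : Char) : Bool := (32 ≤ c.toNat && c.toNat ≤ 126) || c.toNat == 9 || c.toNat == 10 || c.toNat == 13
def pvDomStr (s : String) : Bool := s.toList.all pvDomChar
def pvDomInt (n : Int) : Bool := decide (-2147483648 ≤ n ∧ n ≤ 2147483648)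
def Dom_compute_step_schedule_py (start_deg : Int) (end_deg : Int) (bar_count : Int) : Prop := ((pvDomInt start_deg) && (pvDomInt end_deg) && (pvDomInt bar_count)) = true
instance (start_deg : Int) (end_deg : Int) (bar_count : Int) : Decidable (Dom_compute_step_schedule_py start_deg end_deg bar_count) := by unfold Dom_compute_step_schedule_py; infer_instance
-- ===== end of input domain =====

-- B replaces A's running-total loop by two independent list comprehensions (the r front-loaded
-- bars, then the remaining bars), each a direct formula; same O(n) cost (objective: alternative).

-- ===== PORT A =====
def compute_step_schedule_py (start_deg : Int) (end_deg : Int) (bar_count : Int) : List Int :=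
  let total_steps : Int := end_deg - start_deg
  let sign : Int := if total_steps ≥ 0 then 1 else -1
  match PySem.Int.divmod? |total_steps| bar_count with
  | none => []  -- ZeroDivisionError: excluded by Pre_
  | some (q, r) =>
    ((PySem.List.pyRange 0 bar_count 1).foldl
      (fun st i =>
        let step : Int := if i < r then q + 1 else q
        let cumulative : Int := st.2 + step * sign
        (st.1 ++ [cumulative], cumulative)) (([] : List Int), (0 : Int))).1

-- ===== PORT B =====
def compute_step_schedule_py_alt (start_deg : Int) (end_deg : Int) (bar_count : Int) : List Int :=
  match PySem.Int.divmod? |end_deg - start_deg| bar_count with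
  | none => []  -- ZeroDivisionError: excluded by Pre_
  | some (q, r) =>
    let s : Int := if end_deg ≥ start_deg then 1 else -1
    let big : List Int := (PySem.List.pyRange 1 (r + 1) 1).map (fun k => s * k * (q + 1))
    let small : List Int :=
      (PySem.List.pyRange 1 (bar_count - r + 1) 1).map (fun j => s * (r * (q + 1) + j * q))
    big ++ small

-- ===== PRECONDITION & SPEC =====
-- Pre_ excludes exactly bar_count = 0, where Python's divmod raises ZeroDivisionError.
def Pre_compute_step_schedule_py (start_deg : Int) (end_deg : Int) (bar_count : Int) : Prop := bar_count ≠ 0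
instance (start_deg : Int) (end_deg : Int) (bar_count : Int) : Decidable (Pre_compute_step_schedule_py start_deg end_deg bar_count) := by unfold Pre_compute_step_schedule_py; infer_instance
def pvWitness_compute_step_schedule_py : Int × Int × Int := (1, 8, 3)
def Spec_compute_step_schedule_py (start_deg : Int) (end_deg : Int) (bar_count : Int) (out : List Int) : Prop := out = compute_step_schedule_py_alt start_deg end_deg bar_count
instance (start_deg : Int) (end_deg : Int) (bar_count : Int) (out : List Int) : Decidable (Spec_compute_step_schedule_py start_deg end_deg bar_count out) := by unfold Spec_compute_step_schedule_py; infer_instance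

-- ===== CLAIM (what is proved, stated in full; the proofs are below) =====
def Claim_equal_compute_step_schedule_py : Prop := ∀ (start_deg : Int) (end_deg : Int) (bar_count : Int), Dom_compute_step_schedule_py start_deg end_deg bar_count → Pre_compute_step_schedule_py start_deg end_deg bar_count → Spec_compute_step_schedule_py start_deg end_deg bar_count (compute_step_schedule_py start_deg end_deg bar_count)

-- ===== LEMMAS AND PROOFS =====

-- Loop invariant: after n iterations the accumulator pair of A's fold over range(n)
-- is (the list of closed-form cumulative values, the closed-form cumulative for n bars).
theorem csched_loop_inv (q r sign : Int) (hr : 0 ≤ r) (n : Nat) :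
    ((PySem.List.pyRange 0 (n : Int) 1).foldl
      (fun st i =>
        (st.1 ++ [st.2 + (if i < r then q + 1 else q) * sign],
          st.2 + (if i < r then q + 1 else q) * sign)) (([] : List Int), (0 : Int))) =
    ((PySem.List.pyRange 0 (n : Int) 1).map
        (fun i => sign * (min (i + 1) r * (q + 1) + max 0 (i + 1 - r) * q)),
      sign * (min (n : Int) r * (q + 1) + max 0 ((n : Int) - r) * q)) := by
  induction n with
  | zero =>
    rw [Int.natCast_zero, PySem.List.pyRange_one_eq_nil (by omega : (0:Int) ≤ 0)]
    rw [List.foldl_nil, List.map_nil]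
    rw [min_eq_left hr, max_eq_left (by omega)]
    norm_num
  | succ n ih =>
    have h1 : ((n : Int) + 1) = ((n + 1 : Nat) : Int) := by push_cast; ring
    rw [← h1, PySem.List.pyRange_one_succ_right (by positivity), List.foldl_append, ih,
      List.map_append, List.foldl_cons, List.foldl_nil, List.map_cons, List.map_nil]
    by_cases hc : (n : Int) < r
    · rw [if_pos hc, min_eq_left (by omega), min_eq_left (by omega),
        max_eq_left (by omega), max_eq_left (by omega)]
      have hv : sign * ((n : Int) * (q + 1) + 0 * q) + (q + 1) * sign
          = sign * (((n : Int) + 1) * (q + 1) + 0 * q) := by ring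
      simp only [Prod.mk.injEq]
      exact ⟨by rw [hv], hv⟩
    · rw [if_neg hc, min_eq_right (by omega), min_eq_right (by omega),
        max_eq_right (by omega), max_eq_right (by omega)]
      have hv : sign * (r * (q + 1) + ((n : Int) - r) * q) + q * sign
          = sign * (r * (q + 1) + ((n : Int) + 1 - r) * q) := by ring
      simp only [Prod.mk.injEq]
      exact ⟨by rw [hv], hv⟩

-- The closed-form map over range(n) splits into B's two slabs when 0 ≤ r ≤ n.
theorem csched_split (q r s : Int) (n : Int) (hr : 0 ≤ r) (hrn : r ≤ n) :
    (PySem.List.pyRange 0 n 1).map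
        (fun i => s * (min (i + 1) r * (q + 1) + max 0 (i + 1 - r) * q)) =
    (PySem.List.pyRange 1 (r + 1) 1).map (fun k => s * k * (q + 1)) ++
    (PySem.List.pyRange 1 (n - r + 1) 1).map (fun j => s * (r * (q + 1) + j * q)) := by
  rw [PySem.List.pyRange_one, PySem.List.pyRange_one, PySem.List.pyRange_one]
  have h1 : (n - 0).toNat = r.toNat + (n - r).toNat := by omega
  have h2 : (r + 1 - 1).toNat = r.toNat := by omega
  have h3 : (n - r + 1 - 1).toNat = (n - r).toNat := by omega
  rw [h1, h2, h3, List.range_add]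
  simp only [List.map_append, List.map_map]
  congr 1
  · apply List.map_congr_left
    intro k hk
    have hk' : (k : Int) < r := by
      have := List.mem_range.mp hk; omega
    simp only [Function.comp]
    rw [min_eq_left (by omega), max_eq_left (by omega)]
    ring
  · apply List.map_congr_left
    intro k _
    simp only [Function.comp]
    have hc : ((r.toNat + k : Nat) : Int) = r + (k : Int) := by push_cast; omega
    rw [hc]
    rw [min_eq_right (by omega), max_eq_right (by omega)]
    ring

-- ===== VERDICT =====
theorem compute_step_schedule_py_spec : Claim_equal_compute_step_schedule_py := by
  intro start_deg end_deg bar_count _ hpre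
  unfold Spec_compute_step_schedule_py compute_step_schedule_py compute_step_schedule_py_alt
  simp only []
  have hdm : PySem.Int.divmod? |end_deg - start_deg| bar_count =
      some (PySem.Int.floordiv |end_deg - start_deg| bar_count,
            PySem.Int.mod |end_deg - start_deg| bar_count) := by
    simp only [PySem.Int.divmod?, if_neg hpre, PySem.Int.floordiv, PySem.Int.mod]
  have hsign : ((if end_deg - start_deg ≥ 0 then (1:Int) else -1)
      = if end_deg ≥ start_deg then 1 else -1) := by
    by_cases h : end_deg ≥ start_deg
    · rw [if_pos h, if_pos (by omega)]
    · rw [if_neg h, if_neg (by omega)]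
  rw [hdm]
  dsimp only
  rcases lt_or_gt_of_ne hpre with hb | hb
  · -- bar_count < 0: empty on both sides
    obtain ⟨hlo, hhi⟩ := PySem.Int.mod_neg_bounds (a := |end_deg - start_deg|) hb
    rw [PySem.List.pyRange_one_eq_nil (by omega : bar_count ≤ 0),
      PySem.List.pyRange_one_eq_nil (by omega : (PySem.Int.mod |end_deg - start_deg| bar_count) + 1 ≤ 1),
      PySem.List.pyRange_one_eq_nil (by omega : bar_count - (PySem.Int.mod |end_deg - start_deg| bar_count) + 1 ≤ 1)]
    simp
  · -- bar_count > 0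
    have hr : 0 ≤ PySem.Int.mod |end_deg - start_deg| bar_count :=
      PySem.Int.mod_nonneg _ hb
    have hrn : PySem.Int.mod |end_deg - start_deg| bar_count ≤ bar_count :=
      le_of_lt (PySem.Int.mod_lt _ hb)
    obtain ⟨n, rfl⟩ : ∃ n : Nat, bar_count = (n : Int) := ⟨bar_count.toNat, by omega⟩
    rw [csched_loop_inv _ _ _ hr n]
    dsimp only
    rw [csched_split _ _ _ _ hr hrn, hsign]
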